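-- pv_equiv track=rewrite | github.com/minj-L/Algorism | LeetCode_BinarySearch/34.FindFirstandLastPositionofElementinSortedArray.py | solution
-- ===== SOURCE A (Python) =====
-- def solution(nums, target):
--     start = 0
--     end = len(nums) - 1
--
--     answer = [-1, -1]
--     while start <= end:
--         if answer[0] != -1 and answer[1] != -1:
--             break
--         if target > nums[start]:
--             start += 1
--         elif target == nums[start]:
--             answer[0] = start
--
--         if target < nums[end]:
--             end -= 1
--         elif target == nums[end]:
--             answer[1] = end
--     return answer
-- ===== SOURCE B (Python) =====
-- def _lower(nums, x):
--     # least index i with nums[i] >= x (len(nums) if none), by binary search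
--     lo, hi = 0, len(nums)
--     while lo < hi:
--         mid = (lo + hi) // 2
--         if nums[mid] < x:
--             lo = mid + 1
--         else:
--             hi = mid
--     return lo
--
--
-- def solution(nums, target):
--     lo = _lower(nums, target)
--     if lo == len(nums) or nums[lo] != target:
--         return [-1, -1]
--     return [lo, _lower(nums, target + 1) - 1]
-- ===== Notes on version B (the rewrite author's own statement) =====
-- stated objective: faster
-- what changed: Replaced A's two-pointer linear scan from both ends by two binary searches (lower bound of target and of target+1).
-- outside the precondition, e.g. on solution([1, 3, 1], 1): A returns [0, 2], B returns [0, 0]; on solution([3, 1], 2): A does not finish within the time limit, B returns [-1, -1]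
import Mathlib
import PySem

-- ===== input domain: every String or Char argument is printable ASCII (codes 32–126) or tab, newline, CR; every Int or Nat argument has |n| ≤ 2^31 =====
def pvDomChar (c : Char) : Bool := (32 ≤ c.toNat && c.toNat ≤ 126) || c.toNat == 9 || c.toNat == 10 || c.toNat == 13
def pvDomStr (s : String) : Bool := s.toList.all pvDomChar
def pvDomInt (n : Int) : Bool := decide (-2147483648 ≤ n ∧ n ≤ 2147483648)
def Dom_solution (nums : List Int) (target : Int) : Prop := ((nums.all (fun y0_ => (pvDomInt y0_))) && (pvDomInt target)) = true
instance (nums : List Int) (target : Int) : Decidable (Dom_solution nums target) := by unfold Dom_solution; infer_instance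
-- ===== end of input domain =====

-- B replaces A's two-pointer linear scan by two binary searches (lower bound of
-- target and of target+1): an asymptotically faster exact re-implementation on
-- sorted input (Pre_). Equivalence is about the return value.

-- ===== PORT A =====
-- A's while-loop; fuel `nums.length + 2` suffices on every sorted input (each
-- iteration moves a pointer or the next one breaks) and is proved never to run
-- out under Pre_. Both index accesses are provably in range on reachable states
-- (0 ≤ start ≤ end < len), so the `pyGetD … 0` default is never used.
def loopA (nums : List Int) (target : Int) : Nat → Int → Int → Int → Int → Int × Int
  | 0, _, _, a0, a1 => (a0, a1)
  | f+1, s, e, a0, a1 =>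
    if s ≤ e then
      if a0 ≠ -1 ∧ a1 ≠ -1 then (a0, a1)
      else
        -- first if/elif block: start / answer[0]
        let s' := if target > PySem.List.pyGetD nums s 0 then s + 1 else s
        let a0' := if target > PySem.List.pyGetD nums s 0 then a0
                   else if target = PySem.List.pyGetD nums s 0 then s else a0
        -- second if/elif block: end / answer[1]
        let e' := if target < PySem.List.pyGetD nums e 0 then e - 1 else e
        let a1' := if target < PySem.List.pyGetD nums e 0 then a1
                   else if target = PySem.List.pyGetD nums e 0 then e else a1
        loopA nums target f s' e' a0' a1'
    else (a0, a1)

def solution (nums : List Int) (target : Int) : List Int :=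
  let r := loopA nums target (nums.length + 2) 0 ((nums.length : Int) - 1) (-1) (-1)
  [r.1, r.2]

-- ===== PORT B =====
-- B's hand-written binary search: least index i with nums[i] ≥ x (len if none).
-- lo, hi are nonnegative Python ints, so Nat with Nat `/ 2` = Python `// 2`;
-- the access nums[mid] has lo ≤ mid < hi ≤ len, in range. The while loop is
-- totalised with fuel `nums.length + 1` ≥ hi - lo + 1, proved never exhausted.
def lowerLoop (nums : List Int) (x : Int) : Nat → Nat → Nat → Nat
  | 0, lo, _ => lo
  | f + 1, lo, hi =>
    if lo < hi then
      let mid := (lo + hi) / 2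
      if PySem.List.pyGetD nums (mid : Int) 0 < x then lowerLoop nums x f (mid + 1) hi
      else lowerLoop nums x f lo mid
    else lo

def solution_alt (nums : List Int) (target : Int) : List Int :=
  let lo := lowerLoop nums target (nums.length + 1) 0 nums.length
  if lo = nums.length then [-1, -1]
  else if PySem.List.pyGetD nums (lo : Int) 0 ≠ target then [-1, -1]
  else [(lo : Int), (lowerLoop nums (target + 1) (nums.length + 1) 0 nums.length : Int) - 1]

-- ===== PRECONDITION & SPEC =====
-- Pre_ excludes unsorted lists: there A's two-pointer scan can loop forever
-- (e.g. nums=[3,1], target=2), and where it does terminate its value is an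
-- accident of the scan order; the problem's domain is sorted arrays.
def Pre_solution (nums : List Int) (target : Int) : Prop := nums.Pairwise (· ≤ ·)
instance (nums : List Int) (target : Int) : Decidable (Pre_solution nums target) := by unfold Pre_solution; infer_instance

def pvWitness_solution : List Int × Int := ([1, 2, 2, 3], 2)

def Spec_solution (nums : List Int) (target : Int) (out : List Int) : Prop := out = solution_alt nums target
instance (nums : List Int) (target : Int) (out : List Int) : Decidable (Spec_solution nums target out) := by unfold Spec_solution; infer_instance

-- ===== CLAIM (what is proved, stated in full; the proofs are below) =====
def Claim_equal_solution : Prop := ∀ (nums : List Int) (target : Int), Dom_solution nums target → Pre_solution nums target → Spec_solution nums target (solution nums target)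

-- ===== LEMMAS AND PROOFS =====

-- On a sorted list the indices whose element is < x are exactly the first
-- countP (· < x) indices.
lemma count_lt_char (nums : List Int) (x : Int) (hs : List.Pairwise (· ≤ ·) nums) :
    ∀ (i : Nat) (hi : i < nums.length),
      (nums[i] < x ↔ i < nums.countP (fun v => decide (v < x))) := by
  induction nums with
  | nil => intro i hi; simp at hi
  | cons a t ih =>
    rw [List.pairwise_cons] at hs
    obtain ⟨ha, ht⟩ := hs
    intro i hi
    rw [List.countP_cons]
    by_cases hax : a < x
    · cases i with
      | zero => simp [hax]
      | succ j =>
        have hj : j < t.length := by simpa using hi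
        have h' := ih ht j hj
        simp only [List.getElem_cons_succ, hax, decide_true, if_true]
        rw [h']
        omega
    · have hz : t.countP (fun v => decide (v < x)) = 0 := by
        rw [List.countP_eq_zero]
        intro b hb
        simp only [decide_eq_true_eq]
        exact fun h => hax (lt_of_le_of_lt (ha b hb) h)
      cases i with
      | zero => simp [hax, hz]
      | succ j =>
        have hj : j < t.length := by simpa using hi
        have hb : ¬ t[j] < x := fun h => hax (lt_of_le_of_lt (ha _ (List.getElem_mem hj)) h)
        simp [hax, hz, hb]

-- Once both answers are set, A's loop returns them unchanged.
lemma loopA_done (nums : List Int) (target : Int) (f : Nat) (s e a0 a1 : Int)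
    (h0 : a0 ≠ -1) (h1 : a1 ≠ -1) :
    loopA nums target f s e a0 a1 = (a0, a1) := by
  cases f with
  | zero => rw [loopA]
  | succ f =>
    rw [loopA]
    by_cases hse : s ≤ e
    · rw [if_pos hse, if_pos ⟨h0, h1⟩]
    · rw [if_neg hse]

-- The value A's loop state carries once start > end is the common answer.
lemma exit_val (c1 c2 : Nat) (s e a0 a1 : Int)
    (hA : (a0 = -1 ∧ s ≤ (c1 : Int)) ∨ (a0 = (c1 : Int) ∧ s = (c1 : Int) ∧ c1 < c2))
    (hB : (a1 = -1 ∧ (c2 : Int) - 1 ≤ e) ∨ (a1 = (c2 : Int) - 1 ∧ e = (c2 : Int) - 1 ∧ c1 < c2))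
    (hse : e < s) :
    (a0, a1) = (if c1 < c2 then ((c1 : Int), (c2 : Int) - 1) else (-1, -1)) := by
  rcases hA with ⟨rfl, h2a⟩ | ⟨rfl, rfl, h3a⟩ <;>
    rcases hB with ⟨rfl, h2b⟩ | ⟨rfl, h2b, h3b⟩ <;>
      split_ifs <;> simp only [Prod.mk.injEq] <;> omega

-- Main invariant lemma for A's loop.
lemma loopA_eq (nums : List Int) (target : Int) (c1 c2 : Nat)
    (h1 : ∀ (i : Nat) (hi : i < nums.length), (nums[i] < target ↔ i < c1))
    (h2 : ∀ (i : Nat) (hi : i < nums.length), (nums[i] ≤ target ↔ i < c2))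
    (h12 : c1 ≤ c2) :
    ∀ (f : Nat) (s e a0 a1 : Int),
      0 ≤ s → e < (nums.length : Int) →
      ((a0 = -1 ∧ s ≤ (c1 : Int)) ∨ (a0 = (c1 : Int) ∧ s = (c1 : Int) ∧ c1 < c2)) →
      ((a1 = -1 ∧ (c2 : Int) - 1 ≤ e) ∨ (a1 = (c2 : Int) - 1 ∧ e = (c2 : Int) - 1 ∧ c1 < c2)) →
      e - s + 2 ≤ (f : Int) →
      loopA nums target f s e a0 a1
        = (if c1 < c2 then ((c1 : Int), (c2 : Int) - 1) else (-1, -1)) := by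
  intro f
  induction f with
  | zero =>
    intro s e a0 a1 hs he hA hB hf
    rw [loopA]
    exact exit_val c1 c2 s e a0 a1 hA hB (by omega)
  | succ f ih =>
    intro s e a0 a1 hs he hA hB hf
    rw [loopA]
    by_cases hse : s ≤ e
    · by_cases hba : a0 ≠ -1 ∧ a1 ≠ -1
      · rw [if_pos hse, if_pos hba]
        obtain ⟨hb0, hb1⟩ := hba
        rcases hA with ⟨rfl, _⟩ | ⟨rfl, rfl, h3a⟩
        · exact absurd rfl hb0
        rcases hB with ⟨rfl, _⟩ | ⟨rfl, h2b, h3b⟩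
        · exact absurd rfl hb1
        rw [if_pos h3a]
      · rw [if_pos hse, if_neg hba]
        -- index facts
        have hsn : s.toNat < nums.length := by omega
        have hen : e.toNat < nums.length := by omega
        have hget_s : PySem.List.pyGetD nums s 0 = nums[s.toNat] := by
          conv_lhs => rw [← Int.toNat_of_nonneg hs]
          rw [PySem.List.pyGetD_natCast, List.getD_eq_getElem _ _ hsn]
        have hget_e : PySem.List.pyGetD nums e 0 = nums[e.toNat] := by
          conv_lhs => rw [← Int.toNat_of_nonneg (by omega : (0:Int) ≤ e)]
          rw [PySem.List.pyGetD_natCast, List.getD_eq_getElem _ _ hen]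
        have k1 : nums[s.toNat] < target ↔ s < (c1 : Int) := by rw [h1 s.toNat hsn]; omega
        have k2 : nums[s.toNat] ≤ target ↔ s < (c2 : Int) := by rw [h2 s.toNat hsn]; omega
        have k3 : nums[e.toNat] < target ↔ e < (c1 : Int) := by rw [h1 e.toNat hen]; omega
        have k4 : nums[e.toNat] ≤ target ↔ e < (c2 : Int) := by rw [h2 e.toNat hen]; omega
        simp only [hget_s, hget_e, gt_iff_lt]
        by_cases cS1 : nums[s.toNat] < target
        · -- start += 1
          have hsc1 : s < (c1 : Int) := k1.mp cS1
          have ha0 : a0 = -1 := by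
            rcases hA with ⟨h, _⟩ | ⟨_, h, _⟩
            · exact h
            · omega
          subst ha0
          simp only [if_pos cS1]
          by_cases cE1 : target < nums[e.toNat]
          · simp only [if_pos cE1]
            have hec2 : (c2 : Int) ≤ e := by
              have := k4; omega
            have ha1 : a1 = -1 := by
              rcases hB with ⟨h, _⟩ | ⟨_, h, _⟩
              · exact h
              · omega
            subst ha1
            exact ih (s + 1) (e - 1) (-1) (-1) (by omega) (by omega)
              (Or.inl ⟨rfl, by omega⟩) (Or.inl ⟨rfl, by omega⟩) (by omega)
          · simp only [if_neg cE1]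
            have hB' : (ite (target = nums[e.toNat]) e a1 = -1 ∧ (c2 : Int) - 1 ≤ e) ∨
                (ite (target = nums[e.toNat]) e a1 = (c2 : Int) - 1 ∧ e = (c2 : Int) - 1 ∧ c1 < c2) := by
              by_cases cE2 : target = nums[e.toNat]
              · simp only [if_pos cE2]
                have h1' : e < (c2 : Int) := k4.mp (le_of_eq cE2.symm)
                have h2' : (c1 : Int) ≤ e := by have := k3; omega
                have he' : e = (c2 : Int) - 1 := by
                  rcases hB with ⟨_, h⟩ | ⟨_, h, _⟩ <;> omega
                exact Or.inr ⟨he', he', by omega⟩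
              · simp only [if_neg cE2]
                exact hB
            exact ih (s + 1) e (-1) _ (by omega) he
              (Or.inl ⟨rfl, by omega⟩) hB' (by omega)
        · -- start unchanged
          have hc1s : (c1 : Int) ≤ s := by have := k1; omega
          simp only [if_neg cS1]
          by_cases cS2 : target = nums[s.toNat]
          · -- answer[0] = start
            simp only [if_pos cS2]
            have hsc2 : s < (c2 : Int) := k2.mp (le_of_eq cS2.symm)
            have hseq : s = (c1 : Int) := by
              rcases hA with ⟨_, h⟩ | ⟨_, h, _⟩ <;> omega
            have hcc : c1 < c2 := by omega
            by_cases cE1 : target < nums[e.toNat]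
            · simp only [if_pos cE1]
              have hec2 : (c2 : Int) ≤ e := by have := k4; omega
              have ha1 : a1 = -1 := by
                rcases hB with ⟨h, _⟩ | ⟨_, h, _⟩
                · exact h
                · omega
              subst ha1
              exact ih s (e - 1) s (-1) hs (by omega)
                (Or.inr ⟨hseq, hseq, hcc⟩) (Or.inl ⟨rfl, by omega⟩) (by omega)
            · simp only [if_neg cE1]
              by_cases cE2 : target = nums[e.toNat]
              · -- both answers set: loop exits next iteration regardless of fuel
                simp only [if_pos cE2]
                have h1' : e < (c2 : Int) := k4.mp (le_of_eq cE2.symm)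
                have he' : e = (c2 : Int) - 1 := by
                  rcases hB with ⟨_, h⟩ | ⟨_, h, _⟩ <;> omega
                rw [loopA_done nums target f s e s e (by omega) (by omega)]
                rw [if_pos hcc]
                simp only [Prod.mk.injEq]
                omega
              · -- target > nums[e]: contradiction with s ≤ e here
                exfalso
                have hec1 : e < (c1 : Int) := by
                  have hlt : nums[e.toNat] < target := by
                    rcases lt_trichotomy target nums[e.toNat] with h | h | h
                    · exact absurd h cE1
                    · exact absurd h cE2
                    · exact h
                  exact k3.mp hlt
                omega
          · -- target < nums[s]
            simp only [if_neg cS2]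
            have hsgt : target < nums[s.toNat] := by
              rcases lt_trichotomy target nums[s.toNat] with h | h | h
              · exact h
              · exact absurd h cS2
              · exact absurd h cS1
            have hc2s : (c2 : Int) ≤ s := by have := k2; omega
            have ha0 : a0 = -1 := by
              rcases hA with ⟨h, _⟩ | ⟨_, _, h⟩
              · exact h
              · omega
            subst ha0
            have hseq : s = (c1 : Int) := by
              rcases hA with ⟨_, h⟩ | ⟨h, _, _⟩ <;> omega
            by_cases cE1 : target < nums[e.toNat]
            · simp only [if_pos cE1]
              have hec2 : (c2 : Int) ≤ e := by have := k4; omega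
              have ha1 : a1 = -1 := by
                rcases hB with ⟨h, _⟩ | ⟨_, _, h⟩
                · exact h
                · omega
              subst ha1
              exact ih s (e - 1) (-1) (-1) hs (by omega)
                (Or.inl ⟨rfl, by omega⟩) (Or.inl ⟨rfl, by omega⟩) (by omega)
            · -- remaining combinations are impossible when s ≤ e
              exfalso
              by_cases cE2 : target = nums[e.toNat]
              · have h1' : e < (c2 : Int) := k4.mp (le_of_eq cE2.symm)
                omega
              · have hlt : nums[e.toNat] < target := by
                  rcases lt_trichotomy target nums[e.toNat] with h | h | h
                  · exact absurd h cE1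
                  · exact absurd h cE2
                  · exact h
                have hec1 : e < (c1 : Int) := k3.mp hlt
                omega
    · rw [if_neg hse]
      exact exit_val c1 c2 s e a0 a1 hA hB (by omega)

-- B's binary search finds countP (· < x) on a sorted list.
lemma lowerLoop_eq (nums : List Int) (x : Int)
    (hchar : ∀ (i : Nat) (hi : i < nums.length),
      (nums[i] < x ↔ i < nums.countP (fun v => decide (v < x)))) :
    ∀ (f lo hi : Nat), hi - lo ≤ f → hi ≤ nums.length →
      lo ≤ nums.countP (fun v => decide (v < x)) →
      nums.countP (fun v => decide (v < x)) ≤ hi →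
      lowerLoop nums x f lo hi = nums.countP (fun v => decide (v < x)) := by
  intro f
  induction f with
  | zero =>
    intro lo hi hk hlen hlo hhi
    simp only [lowerLoop]
    omega
  | succ f ih =>
    intro lo hi hk hlen hlo hhi
    rw [lowerLoop]
    by_cases h : lo < hi
    · rw [if_pos h]
      have hmlen : (lo + hi) / 2 < nums.length := by omega
      have hget : PySem.List.pyGetD nums (((lo + hi) / 2 : Nat) : Int) 0 = nums[(lo + hi) / 2] := by
        rw [PySem.List.pyGetD_natCast, List.getD_eq_getElem _ _ hmlen]
      simp only [hget]
      by_cases hcmp : nums[(lo + hi) / 2] < x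
      · have hmc : (lo + hi) / 2 < nums.countP (fun v => decide (v < x)) :=
          (hchar _ hmlen).mp hcmp
        rw [if_pos hcmp]
        exact ih ((lo + hi) / 2 + 1) hi (by omega) hlen (by omega) hhi
      · have hmc : nums.countP (fun v => decide (v < x)) ≤ (lo + hi) / 2 := by
          have := mt (hchar _ hmlen).mpr hcmp
          omega
        rw [if_neg hcmp]
        exact ih lo ((lo + hi) / 2) (by omega) (by omega) hlo (by omega)
    · rw [if_neg h]
      omega

-- ===== VERDICT (by name: the statement is the Claim_ definition above) =====
theorem solution_spec : Claim_equal_solution := by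
  intro nums target _ hpre
  unfold Spec_solution
  have h1 := count_lt_char nums target hpre
  have h2' := count_lt_char nums (target + 1) hpre
  set c1 := nums.countP (fun v => decide (v < target)) with hc1
  set c2 := nums.countP (fun v => decide (v < target + 1)) with hc2
  have h2 : ∀ (i : Nat) (hi : i < nums.length), (nums[i] ≤ target ↔ i < c2) := by
    intro i hi
    rw [← Int.lt_add_one_iff]
    exact h2' i hi
  have h12 : c1 ≤ c2 := List.countP_mono_left (fun a _ h => by
    simp only [decide_eq_true_eq] at h ⊢; omega)
  have h2n : c2 ≤ nums.length := List.countP_le_length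
  show solution nums target = solution_alt nums target
  unfold solution solution_alt
  rw [loopA_eq nums target c1 c2 h1 h2 h12 (nums.length + 2) 0 ((nums.length : Int) - 1)
    (-1) (-1) (by omega) (by omega) (Or.inl ⟨rfl, by omega⟩) (Or.inl ⟨rfl, by omega⟩)
    (by push_cast; omega)]
  rw [lowerLoop_eq nums target h1 (nums.length + 1) 0 nums.length (by omega) le_rfl
      (by omega) (by omega),
    lowerLoop_eq nums (target + 1) h2' (nums.length + 1) 0 nums.length (by omega) le_rfl
      (by omega) (by omega)]
  rw [← hc1, ← hc2]
  by_cases hc : c1 < c2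
  · rw [if_pos hc]
    have hlt : c1 < nums.length := lt_of_lt_of_le hc h2n
    have hne : ¬ c1 = nums.length := by omega
    have hval : nums[c1] = target := by
      have ha := h1 c1 hlt
      have hb := (h2 c1 hlt).mpr hc
      omega
    have hget : PySem.List.pyGetD nums ((c1 : Nat) : Int) 0 = nums[c1] := by
      rw [PySem.List.pyGetD_natCast, List.getD_eq_getElem _ _ hlt]
    have h2cond : ¬ (PySem.List.pyGetD nums ((c1 : Nat) : Int) 0 ≠ target) :=
      fun h => h (hget.trans hval)
    simp only [if_neg hne, if_neg h2cond]
  · rw [if_neg hc]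
    by_cases hl : c1 = nums.length
    · simp only [if_pos hl]
    · have hlt : c1 < nums.length := by omega
      have hneq : PySem.List.pyGetD nums ((c1 : Nat) : Int) 0 ≠ target := by
        rw [PySem.List.pyGetD_natCast, List.getD_eq_getElem _ _ hlt]
        intro hEq
        have hb := (h2 c1 hlt).mp (le_of_eq hEq)
        omega
      simp only [if_neg hl, if_pos hneq]
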